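-- pv_equiv track=rewrite | github.com/cedricwangyu/LC | 582-Kill_Process.py | killProcess
-- ===== SOURCE A (Python) =====
-- from typing import List
--
-- def killProcess(pid: List[int], ppid: List[int], kill: int) -> List[int]:
--     p = {}
--     for i in range(len(pid)):
--         if ppid[i] in p: p[ppid[i]].append(pid[i])
--         else: p[ppid[i]] = [pid[i]]
--     res = []
--     def helper(root):
--         res.append(root)
--         if root not in p: return
--         for node in p[root]: helper(node)
--     helper(kill)
--     return res
-- ===== SOURCE B (Python) =====
-- from typing import List
--
-- def killProcess(pid: List[int], ppid: List[int], kill: int) -> List[int]: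
--     p = {}
--     for par, ch in zip(ppid, pid):
--         p.setdefault(par, []).append(ch)
--     res = []
--     stack = [kill]
--     while stack:
--         x = stack.pop()
--         res.append(x)
--         if x in p:
--             stack.extend(reversed(p[x]))
--     return res
-- ===== Notes on version B (the rewrite author's own statement) =====
-- stated objective: alternative
-- what changed: The recursive preorder helper (with a shared res accumulator and Python's recursion limit) is replaced by an iterative preorder DFS over an explicit stack, popping a node and pushing its children reversed so siblings are visited left-to-right; the parent->children grouping loop is kept.
import Mathlib
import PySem

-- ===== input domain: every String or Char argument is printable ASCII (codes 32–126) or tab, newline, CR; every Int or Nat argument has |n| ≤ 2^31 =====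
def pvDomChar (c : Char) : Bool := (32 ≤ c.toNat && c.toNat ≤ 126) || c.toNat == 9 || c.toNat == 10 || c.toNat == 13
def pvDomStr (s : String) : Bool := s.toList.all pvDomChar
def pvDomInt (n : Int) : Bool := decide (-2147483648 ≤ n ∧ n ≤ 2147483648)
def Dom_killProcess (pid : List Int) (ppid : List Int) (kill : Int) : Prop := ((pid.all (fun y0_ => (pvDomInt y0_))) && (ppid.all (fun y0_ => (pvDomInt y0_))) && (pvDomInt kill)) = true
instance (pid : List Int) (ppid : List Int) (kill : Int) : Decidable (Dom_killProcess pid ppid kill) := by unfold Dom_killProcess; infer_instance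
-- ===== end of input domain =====

-- B replaces A's recursive preorder helper by an iterative DFS over an explicit stack
-- (children pushed reversed, so siblings are visited left-to-right); same grouping dict, same output.

-- ===== PORT A =====
-- A's grouping loop: for i in range(len(pid)): if ppid[i] in p: p[ppid[i]].append(pid[i]) else: p[ppid[i]] = [pid[i]]
-- (index loop over both lists ported as a fold over ppid.zip pid; inside Pre_ len(pid) ≤ len(ppid), so zip is exact)
def pvBuildA (es : List (Int × Int)) : PySem.Dict Int (List Int) :=
  es.foldl (fun d q =>
    match d.get? q.1 with
    | some l => d.insert q.1 (l ++ [q.2])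
    | none   => d.insert q.1 [q.2]) PySem.Dict.empty

-- A's helper(root): res.append(root); if root not in p: return; for node in p[root]: helper(node)
-- written as structural recursion returning the appended segment; Python has no fuel: the Nat
-- fuel is only a totality guard (none = recursion too deep; under Pre_ depth < len(pid)+2).
mutual
def pvHelpA (p : PySem.Dict Int (List Int)) : Nat → Int → Option (List Int)
  | 0, _ => none
  | g+1, root =>
    match p.get? root with
    | none => some [root]
    | some cs => (pvHelpList p g cs).map (fun l => root :: l)
  termination_by g _ => (g, 0)
  decreasing_by apply Prod.Lex.left; omega
def pvHelpList (p : PySem.Dict Int (List Int)) : Nat → List Int → Option (List Int)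
  | _, [] => some []
  | g, y :: ys =>
    match pvHelpA p g y, pvHelpList p g ys with
    | some a, some b => some (a ++ b)
    | _, _ => none
  termination_by g ys => (g, ys.length + 1)
  decreasing_by
  · apply Prod.Lex.right; simp only [List.length_cons]; omega
  · apply Prod.Lex.right; simp only [List.length_cons]; omega
end

def killProcess (pid : List Int) (ppid : List Int) (kill : Int) : List Int :=
  let p := pvBuildA (ppid.zip pid)
  (pvHelpA p (pid.length + 2) kill).getD []

-- ===== PORT B =====
-- B's grouping loop: for par, ch in zip(ppid, pid): p.setdefault(par, []).append(ch)
def pvBuildB (es : List (Int × Int)) : PySem.Dict Int (List Int) :=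
  es.foldl (fun d q => d.modify q.1 [] (· ++ [q.2])) PySem.Dict.empty

-- B's while loop: x = stack.pop(); res.append(x); if x in p: stack.extend(reversed(p[x]))
-- (list head = stack top, so extend-with-reversed-then-pop = prepend the children in order);
-- fuel is a totality guard only: under Pre_ the loop runs at most (len(pid)+1)^(len(pid)+2) times.
def pvLoopB (p : PySem.Dict Int (List Int)) : Nat → List Int → List Int → List Int
  | 0, _, res => res
  | _+1, [], res => res
  | f+1, x :: st, res =>
    match p.get? x with
    | some cs => pvLoopB p f (cs ++ st) (res ++ [x])
    | none    => pvLoopB p f st (res ++ [x])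

def killProcess_alt (pid : List Int) (ppid : List Int) (kill : Int) : List Int :=
  let p := pvBuildB (ppid.zip pid)
  pvLoopB p ((pid.length + 1) ^ (pid.length + 2)) [kill] []

-- ===== PRECONDITION & SPEC =====
-- closed-form graph helpers for Pre_: children of a node along the parent edges, and the set of
-- nodes reachable from a start set in at most k steps
def pvChildren (es : List (Int × Int)) (x : Int) : List Int :=
  (es.filter (fun q => q.1 == x)).map (·.2)

def pvStep (es : List (Int × Int)) (S : List Int) : List Int :=
  PySem.List.dedup (S ++ S.flatMap (pvChildren es))

def pvReach (es : List (Int × Int)) : Nat → List Int → List Int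
  | 0, S => S
  | k+1, S => pvStep es (pvReach es k S)

-- Pre_ excludes exactly the inputs where Python A raises: IndexError when len(ppid) < len(pid),
-- and RecursionError when some node reachable from kill lies on a cycle of the parent edges.
def Pre_killProcess (pid : List Int) (ppid : List Int) (kill : Int) : Prop :=
  pid.length ≤ ppid.length ∧
  ∀ v ∈ pvReach (ppid.zip pid) (pid.length + 2) [kill],
    v ∉ pvReach (ppid.zip pid) (pid.length + 2) (pvChildren (ppid.zip pid) v)
instance (pid : List Int) (ppid : List Int) (kill : Int) : Decidable (Pre_killProcess pid ppid kill) := by unfold Pre_killProcess; infer_instance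

def pvWitness_killProcess : List Int × List Int × Int := ([3, 10, 5], [1, 3, 3], 1)

def Spec_killProcess (pid : List Int) (ppid : List Int) (kill : Int) (out : List Int) : Prop := out = killProcess_alt pid ppid kill
instance (pid : List Int) (ppid : List Int) (kill : Int) (out : List Int) : Decidable (Spec_killProcess pid ppid kill out) := by unfold Spec_killProcess; infer_instance

-- ===== CLAIM (what is proved, stated in full; the proofs are below) =====
def Claim_equal_killProcess : Prop := ∀ (pid : List Int) (ppid : List Int) (kill : Int), Dom_killProcess pid ppid kill → Pre_killProcess pid ppid kill → Spec_killProcess pid ppid kill (killProcess pid ppid kill)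

-- ===== LEMMAS AND PROOFS =====

-- chains along the parent edges: pvChain es x l ↔ x → l₀ → l₁ → … is an edge path
def pvChain (es : List (Int × Int)) : Int → List Int → Prop
  | _, [] => True
  | x, y :: ys => (x, y) ∈ es ∧ pvChain es y ys

theorem pvBuild_eq (es : List (Int × Int)) : pvBuildA es = pvBuildB es := by
  unfold pvBuildA pvBuildB
  congr 1
  funext d q
  rw [show d.modify q.1 [] (· ++ [q.2]) = d.insert q.1 (d.getD q.1 [] ++ [q.2]) from rfl,
    PySem.Dict.getD_eq_get?_getD]
  cases d.get? q.1 <;> simp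

theorem pvBuildB_getD (es : List (Int × Int)) (x : Int) :
    (pvBuildB es).getD x [] = pvChildren es x := by
  unfold pvBuildB pvChildren
  rw [PySem.Dict.getD_foldl_modify_append]
  simp

theorem pvGet?_some (es : List (Int × Int)) (x : Int) (cs : List Int)
    (h : (pvBuildB es).get? x = some cs) : cs = pvChildren es x := by
  have := pvBuildB_getD es x
  rw [PySem.Dict.getD_eq_get?_getD, h] at this
  simpa using this

theorem pvMem_children (es : List (Int × Int)) (x y : Int) :
    y ∈ pvChildren es x ↔ (x, y) ∈ es := by
  simp only [pvChildren, List.mem_map, List.mem_filter]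
  constructor
  · rintro ⟨⟨a, b⟩, ⟨hm, he⟩, rfl⟩
    simpa [show a = x from by simpa using he] using hm
  · intro h
    exact ⟨(x, y), ⟨h, by simp⟩, rfl⟩

-- success of A's fueled helper when every chain from the root is shorter than the fuel
theorem pvHelpA_some (es : List (Int × Int)) :
    ∀ g : Nat,
      (∀ x : Int, (∀ l, pvChain es x l → l.length < g) →
        ∃ l, pvHelpA (pvBuildB es) g x = some l) ∧
      (∀ ys : List Int, (∀ y ∈ ys, ∀ l, pvChain es y l → l.length < g) →
        ∃ l, pvHelpList (pvBuildB es) g ys = some l) := by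
  intro g
  induction g with
  | zero =>
    constructor
    · intro x h
      exact absurd (h [] trivial) (by omega)
    · intro ys h
      cases ys with
      | nil => exact ⟨[], by rw [pvHelpList]⟩
      | cons y ys => exact absurd (h y (by simp) [] trivial) (by omega)
  | succ g ih =>
    have hA : ∀ x : Int, (∀ l, pvChain es x l → l.length < g + 1) →
        ∃ l, pvHelpA (pvBuildB es) (g+1) x = some l := by
      intro x h
      cases hc : (pvBuildB es).get? x with
      | none => exact ⟨[x], by rw [pvHelpA, hc]⟩
      | some cs =>
        have hcs : cs = pvChildren es x := pvGet?_some es x cs hc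
        obtain ⟨l, hl⟩ := ih.2 cs (by
          intro y hy l hl
          have hedge : (x, y) ∈ es := (pvMem_children es x y).mp (hcs ▸ hy)
          have := h (y :: l) ⟨hedge, hl⟩
          simp only [List.length_cons] at this
          omega)
        exact ⟨x :: l, by rw [pvHelpA, hc]; simp [hl]⟩
    refine ⟨hA, ?_⟩
    intro ys
    induction ys with
    | nil => intro _; exact ⟨[], by rw [pvHelpList]⟩
    | cons y ys ihys =>
      intro h
      obtain ⟨a, ha⟩ := hA y (h y (by simp))
      obtain ⟨b, hb⟩ := ihys (fun z hz => h z (by simp [hz]))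
      exact ⟨a ++ b, by rw [pvHelpList, ha, hb]⟩

-- the stack loop consumes one fuel per emitted element and simulates the recursion
theorem pvLoop_sim (p : PySem.Dict Int (List Int)) :
    ∀ g : Nat,
      (∀ x l, pvHelpA p g x = some l →
        ∀ st res f, pvLoopB p (l.length + f) (x :: st) res = pvLoopB p f st (res ++ l)) ∧
      (∀ ys l, pvHelpList p g ys = some l →
        ∀ st res f, pvLoopB p (l.length + f) (ys ++ st) res = pvLoopB p f st (res ++ l)) := by
  intro g
  induction g with
  | zero =>
    constructor
    · intro x l h; rw [pvHelpA] at h; cases h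
    · intro ys l h st res f
      cases ys with
      | nil =>
        rw [pvHelpList] at h
        cases h
        simp
      | cons y ys => rw [pvHelpList, pvHelpA] at h; cases h
  | succ g ih =>
    have hA : ∀ x l, pvHelpA p (g+1) x = some l →
        ∀ st res f, pvLoopB p (l.length + f) (x :: st) res = pvLoopB p f st (res ++ l) := by
      intro x l h st res f
      rw [pvHelpA] at h
      cases hc : p.get? x with
      | none =>
        rw [hc] at h
        replace h : some [x] = some l := h
        obtain rfl : [x] = l := Option.some.inj h
        show pvLoopB p (1 + f) (x :: st) res = _
        rw [Nat.add_comm 1 f, pvLoopB, hc]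
      | some cs =>
        rw [hc] at h
        replace h : Option.map (fun l => x :: l) (pvHelpList p g cs) = some l := h
        cases hl : pvHelpList p g cs with
        | none => rw [hl] at h; simp at h
        | some l' =>
          rw [hl] at h
          obtain rfl : x :: l' = l := Option.some.inj h
          show pvLoopB p (l'.length + 1 + f) (x :: st) res = _
          rw [show l'.length + 1 + f = (l'.length + f) + 1 by omega, pvLoopB, hc]
          show pvLoopB p (l'.length + f) (cs ++ st) (res ++ [x]) = _
          rw [ih.2 cs l' hl st (res ++ [x]) f]
          simp
    refine ⟨hA, ?_⟩
    intro ys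
    induction ys with
    | nil =>
      intro l h st res f
      rw [pvHelpList] at h
      cases h
      simp
    | cons y ys ihys =>
      intro l h st res f
      rw [pvHelpList] at h
      cases ha : pvHelpA p (g+1) y with
      | none => rw [ha] at h; cases h
      | some a =>
        rw [ha] at h
        cases hb : pvHelpList p (g+1) ys with
        | none => rw [hb] at h; cases h
        | some b =>
          rw [hb] at h
          cases h
          show pvLoopB p ((a ++ b).length + f) ((y :: ys) ++ st) res = _
          rw [show (a ++ b).length + f = a.length + (b.length + f) by simp; omega]
          rw [show ((y :: ys) ++ st) = y :: (ys ++ st) by simp]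
          rw [hA y a ha (ys ++ st) res (b.length + f), ihys b hb st (res ++ a) f]
          simp

-- the emitted segment is at most (|es|+1)^fuel long
theorem pvHelpA_len (es : List (Int × Int)) :
    ∀ g : Nat,
      (∀ x l, pvHelpA (pvBuildB es) g x = some l → l.length ≤ (es.length + 1) ^ g) ∧
      (∀ ys l, pvHelpList (pvBuildB es) g ys = some l → l.length ≤ ys.length * (es.length + 1) ^ g) := by
  intro g
  induction g with
  | zero =>
    constructor
    · intro x l h; rw [pvHelpA] at h; cases h
    · intro ys l h
      cases ys with
      | nil => rw [pvHelpList] at h; cases h; simp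
      | cons y ys => rw [pvHelpList, pvHelpA] at h; cases h
  | succ g ih =>
    have hA : ∀ x l, pvHelpA (pvBuildB es) (g+1) x = some l →
        l.length ≤ (es.length + 1) ^ (g+1) := by
      intro x l h
      rw [pvHelpA] at h
      cases hc : (pvBuildB es).get? x with
      | none =>
        rw [hc] at h
        replace h : some [x] = some l := h
        obtain rfl : [x] = l := Option.some.inj h
        simpa using Nat.one_le_pow _ _ (by omega)
      | some cs =>
        rw [hc] at h
        replace h : Option.map (fun l => x :: l) (pvHelpList (pvBuildB es) g cs) = some l := h
        cases hl : pvHelpList (pvBuildB es) g cs with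
        | none => rw [hl] at h; simp at h
        | some l' =>
          rw [hl] at h
          obtain rfl : x :: l' = l := Option.some.inj h
          have h1 : l'.length ≤ cs.length * (es.length + 1) ^ g := ih.2 cs l' hl
          have h2 : cs.length ≤ es.length := by
            rw [pvGet?_some es x cs hc]
            unfold pvChildren
            calc ((es.filter (fun q => q.1 == x)).map (·.2)).length
                = (es.filter (fun q => q.1 == x)).length := List.length_map ..
              _ ≤ es.length := List.length_filter_le ..
          have h3 : 1 ≤ (es.length + 1) ^ g := Nat.one_le_pow _ _ (by omega)
          have h4 : cs.length * (es.length + 1) ^ g ≤ es.length * (es.length + 1) ^ g :=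
            Nat.mul_le_mul_right _ h2
          have h5 : (es.length + 1) ^ (g+1) = es.length * (es.length + 1) ^ g + (es.length + 1) ^ g := by
            rw [pow_succ]
            ring
          simp only [List.length_cons]
          omega
    refine ⟨hA, ?_⟩
    intro ys
    induction ys with
    | nil => intro l h; rw [pvHelpList] at h; cases h; simp
    | cons y ys ihys =>
      intro l h
      rw [pvHelpList] at h
      cases ha : pvHelpA (pvBuildB es) (g+1) y with
      | none => rw [ha] at h; cases h
      | some a =>
        rw [ha] at h
        cases hb : pvHelpList (pvBuildB es) (g+1) ys with
        | none => rw [hb] at h; cases h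
        | some b =>
          rw [hb] at h
          cases h
          have h1 := hA y a ha
          have h2 := ihys b hb
          have h3 : (ys.length + 1) * (es.length + 1) ^ (g+1)
              = ys.length * (es.length + 1) ^ (g+1) + (es.length + 1) ^ (g+1) := by ring
          simp only [List.length_append, List.length_cons]
          omega

theorem pvLoopB_nil (p : PySem.Dict Int (List Int)) (f : Nat) (res : List Int) :
    pvLoopB p f [] res = res := by cases f <;> rfl

-- reach monotonicity and soundness lemmas
theorem pvStep_mem (es : List (Int × Int)) (S : List Int) (v : Int) (h : v ∈ S) :
    v ∈ pvStep es S := by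
  unfold pvStep; rw [PySem.List.mem_dedup]; exact List.mem_append_left _ h

theorem pvStep_mono (es : List (Int × Int)) (S T : List Int) (h : ∀ v ∈ S, v ∈ T) :
    ∀ v ∈ pvStep es S, v ∈ pvStep es T := by
  intro v hv
  unfold pvStep at *
  rw [PySem.List.mem_dedup] at *
  rcases List.mem_append.mp hv with h1 | h1
  · exact List.mem_append_left _ (h v h1)
  · rcases List.mem_flatMap.mp h1 with ⟨w, hw, hvw⟩
    exact List.mem_append_right _ (List.mem_flatMap.mpr ⟨w, h w hw, hvw⟩)

theorem pvReach_mono_set (es : List (Int × Int)) (k : Nat) (S T : List Int)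
    (h : ∀ v ∈ S, v ∈ T) : ∀ v ∈ pvReach es k S, v ∈ pvReach es k T := by
  induction k with
  | zero => exact h
  | succ k ih => exact fun v hv => pvStep_mono es _ _ ih v hv

theorem pvReach_mono_fuel (es : List (Int × Int)) (j k : Nat) (hjk : j ≤ k) (S : List Int) :
    ∀ v ∈ pvReach es j S, v ∈ pvReach es k S := by
  induction k with
  | zero => intro v hv; rwa [Nat.le_zero.mp hjk] at hv
  | succ k ih =>
    intro v hv
    rcases Nat.lt_or_ge j (k+1) with h | h
    · exact pvStep_mem es _ v (ih (by omega) v hv)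
    · rwa [show j = k+1 by omega] at hv

theorem pvReach_step_comm (es : List (Int × Int)) (k : Nat) (S : List Int) :
    pvReach es k (pvStep es S) = pvStep es (pvReach es k S) := by
  induction k with
  | zero => rfl
  | succ k ih => show pvStep es _ = _; rw [ih]; rfl

-- every element of a chain from x is reachable from x's children
theorem pvChain_reach (es : List (Int × Int)) :
    ∀ (l : List Int) (x : Int), pvChain es x l →
      ∀ v ∈ l, v ∈ pvReach es l.length (pvChildren es x) := by
  intro l
  induction l with
  | nil => intro x _ v hv; cases hv
  | cons y ys ih =>
    intro x hc v hv
    rcases hc with ⟨hedge, hchain⟩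
    rcases List.mem_cons.mp hv with rfl | hv
    · exact pvReach_mono_fuel es 0 (ys.length + 1) (by omega) _ v ((pvMem_children es x v).mpr hedge)
    · have h1 : v ∈ pvReach es ys.length (pvChildren es y) := ih y hchain v hv
      have h2 : ∀ w ∈ pvChildren es y, w ∈ pvStep es (pvChildren es x) := by
        intro w hw
        unfold pvStep
        rw [PySem.List.mem_dedup]
        exact List.mem_append_right _
          (List.mem_flatMap.mpr ⟨y, (pvMem_children es x y).mpr hedge, hw⟩)
      have h3 := pvReach_mono_set es ys.length _ _ h2 v h1
      rw [pvReach_step_comm] at h3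
      exact h3

theorem pvChain_take (es : List (Int × Int)) :
    ∀ (l : List Int) (x : Int) (k : Nat), pvChain es x l → pvChain es x (l.take k) := by
  intro l
  induction l with
  | nil => intro x k _; simp [pvChain]
  | cons y ys ih =>
    intro x k hc
    cases k with
    | zero => trivial
    | succ k => exact ⟨hc.1, ih y k hc.2⟩

theorem pvChain_middle (es : List (Int × Int)) :
    ∀ (u : List Int) (x v : Int) (w : List Int), pvChain es x (u ++ v :: w) → pvChain es v w := by
  intro u
  induction u with
  | nil => intro x v w h; exact h.2
  | cons a u ih => intro x v w h; exact ih a v w h.2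

theorem pvChain_mem_pid (pid ppid : List Int) :
    ∀ (l : List Int) (x : Int), pvChain (ppid.zip pid) x l → ∀ v ∈ l, v ∈ pid := by
  intro l
  induction l with
  | nil => intro x _ v hv; cases hv
  | cons y ys ih =>
    intro x hc v hv
    rcases List.mem_cons.mp hv with rfl | hv
    · exact (List.of_mem_zip hc.1).2
    · exact ih y hc.2 v hv

theorem pvDup_split (l : List Int) (h : ¬ l.Nodup) :
    ∃ a u v w, l = u ++ a :: v ++ a :: w := by
  induction l with
  | nil => exact absurd List.nodup_nil h
  | cons a l ih =>
    by_cases ha : a ∈ l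
    · rcases List.append_of_mem ha with ⟨s, t, rfl⟩
      exact ⟨a, [], s, t, rfl⟩
    · have : ¬ l.Nodup := fun hn => h (List.nodup_cons.mpr ⟨ha, hn⟩)
      rcases ih this with ⟨b, u, v, w, rfl⟩
      exact ⟨b, a :: u, v, w, rfl⟩

theorem pvNodup_len (u pid : List Int) (h : u.Nodup) (hs : ∀ x ∈ u, x ∈ pid) :
    u.length ≤ pid.length := by
  calc u.length = u.toFinset.card := (List.toFinset_card_of_nodup h).symm
    _ ≤ pid.toFinset.card := Finset.card_le_card (by
        intro x hx; rw [List.mem_toFinset] at *; exact hs x hx)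
    _ ≤ pid.length := List.toFinset_card_le pid

theorem pvChain_append_left (es : List (Int × Int)) :
    ∀ (u : List Int) (x : Int) (w : List Int), pvChain es x (u ++ w) → pvChain es x u := by
  intro u
  induction u with
  | nil => intro x w _; trivial
  | cons a u ih => intro x w h; exact ⟨h.1, ih a w h.2⟩

theorem pvChildren_sub_step (es : List (Int × Int)) (x : Int) (S : List Int) (hx : x ∈ S) :
    ∀ w ∈ pvChildren es x, w ∈ pvStep es S := by
  intro w hw
  unfold pvStep
  rw [PySem.List.mem_dedup]
  exact List.mem_append_right _ (List.mem_flatMap.mpr ⟨x, hx, hw⟩)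

-- under Pre_, every chain from kill is shorter than len(pid)+2
theorem pvNo_long_chain (pid ppid : List Int) (kill : Int)
    (hpre : Pre_killProcess pid ppid kill) :
    ∀ l, pvChain (ppid.zip pid) kill l → l.length < pid.length + 2 := by
  intro l hc
  by_contra hlong
  set es := ppid.zip pid with hes
  set n := pid.length with hn
  set u := l.take (n + 1) with hu
  have hul : u.length = n + 1 := by
    rw [hu, List.length_take]
    omega
  have hcu : pvChain es kill u := pvChain_take es l kill (n + 1) hc
  -- an element of u reachable from the children of kill lies in pvReach (n+2) [kill]
  have hreach : ∀ v ∈ u, v ∈ pvReach es (n + 2) [kill] := by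
    intro v hv
    have h1 : v ∈ pvReach es u.length (pvChildren es kill) := pvChain_reach es u kill hcu v hv
    have h2 : v ∈ pvReach es (n + 1) (pvChildren es kill) := by rwa [hul] at h1
    have h3 := pvReach_mono_set es (n + 1) _ _
      (pvChildren_sub_step es kill [kill] (by simp)) v h2
    rw [pvReach_step_comm] at h3
    exact h3
  by_cases hnd : u.Nodup
  · have : u.length ≤ n := pvNodup_len u pid hnd (pvChain_mem_pid pid ppid u kill hcu)
    omega
  · obtain ⟨a, u1, u2, u3, hsplit⟩ := pvDup_split u hnd
    -- a is on a cycle: chain from a back to a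
    have hmid : pvChain es a (u2 ++ a :: u3) := by
      have h := hcu
      rw [hsplit] at h
      refine pvChain_middle es u1 kill a (u2 ++ a :: u3) ?_
      simpa [List.append_assoc] using h
    have hcyc : pvChain es a (u2 ++ [a]) := by
      have := pvChain_append_left es (u2 ++ [a]) a u3
      apply this
      simpa using hmid
    have ha_mem : a ∈ u2 ++ [a] := by simp
    have h1 : a ∈ pvReach es (u2 ++ [a]).length (pvChildren es a) :=
      pvChain_reach es (u2 ++ [a]) a hcyc a ha_mem
    have hlen : (u2 ++ [a]).length ≤ n + 2 := by
      have : u.length = u1.length + u2.length + u3.length + 2 := by rw [hsplit]; simp; omega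
      simp
      omega
    have h2 : a ∈ pvReach es (n + 2) (pvChildren es a) :=
      pvReach_mono_fuel es _ _ hlen _ a h1
    have h3 : a ∈ pvReach es (n + 2) [kill] := hreach a (by rw [hsplit]; simp)
    exact hpre.2 a h3 h2

-- main equivalence
theorem killProcess_spec : Claim_equal_killProcess := by
  intro pid ppid kill _ hpre
  unfold Spec_killProcess killProcess killProcess_alt
  show (pvHelpA (pvBuildA (ppid.zip pid)) (pid.length + 2) kill).getD []
      = pvLoopB (pvBuildB (ppid.zip pid)) ((pid.length + 1) ^ (pid.length + 2)) [kill] []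
  rw [pvBuild_eq]
  set es := ppid.zip pid with hes
  set n := pid.length with hn
  obtain ⟨l, hl⟩ := (pvHelpA_some es (n + 2)).1 kill (pvNo_long_chain pid ppid kill hpre)
  rw [hl]
  have hlen : l.length ≤ (n + 1) ^ (n + 2) := by
    have h1 : l.length ≤ (es.length + 1) ^ (n + 2) := (pvHelpA_len es (n + 2)).1 kill l hl
    have h2 : es.length ≤ n := by
      rw [hes, hn, List.length_zip]
      omega
    exact le_trans h1 (Nat.pow_le_pow_left (by omega) _)
  have hfuel : (n + 1) ^ (n + 2) = l.length + ((n + 1) ^ (n + 2) - l.length) := by omega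
  rw [hfuel, (pvLoop_sim (pvBuildB es) (n + 2)).1 kill l hl [] [] _, pvLoopB_nil]
  simp
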